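-- pv_equiv track=rewrite | github.com/Arcturus1350/jx3_piano | simple_notation_parser.py | _parse_measures
-- ===== SOURCE A (Python) =====
-- from typing import List, Dict, Any
--
-- def _parse_measures(text: str) -> List[List[str]]:
--     """解析小节"""
--     measures = []
--     current_measure = []
--
--     # 按空格分割
--     tokens = text.split()
--
--     for token in tokens:
--         if token == '|':
--             # 小节线，保存当前小节
--             if current_measure:
--                 measures.append(current_measure)
--                 current_measure = []
--         elif token == '||':
--             # 终止线
--             if current_measure:
--                 measures.append(current_measure)
--             break
--         elif token == '-' or token == '0':
--             # 休止符
--             current_measure.append('REST')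
--         else:
--             # 音符
--             current_measure.append(token)
--
--     # 添加最后一个小节
--     if current_measure:
--         measures.append(current_measure)
--
--     return measures
-- ===== SOURCE B (Python) =====
-- def _parse_measures(text):
--     tokens = text.split()
--     if '||' in tokens:
--         tokens = tokens[:tokens.index('||')]
--     groups = []
--     while '|' in tokens:
--         i = tokens.index('|')
--         groups.append(tokens[:i])
--         tokens = tokens[i + 1:]
--     groups.append(tokens)
--     return [['REST' if t in ('-', '0') else t for t in g]
--             for g in groups if g]
-- ===== Notes on version B (the rewrite author's own statement) =====
-- stated objective: idiomatic
-- what changed: Replaced the single accumulating token scan (with per-token branches, break and flush bookkeeping) by a locate-then-split pipeline: truncate the token list at the first '||', split it into groups on '|' by repeated index lookup, then map rests and filter out empty groups in one comprehension.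
-- intended difference: When the first '||' token is directly preceded by a note/rest token (so the current measure is nonempty at the terminator), A appends that last measure twice (it appends before break and again after the loop), while B returns it once, which is the intended 'save the current measure and stop' behaviour. — e.g. on _parse_measures("1 ||"): A returns [["1"], ["1"]], B returns [["1"]]
import Mathlib
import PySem

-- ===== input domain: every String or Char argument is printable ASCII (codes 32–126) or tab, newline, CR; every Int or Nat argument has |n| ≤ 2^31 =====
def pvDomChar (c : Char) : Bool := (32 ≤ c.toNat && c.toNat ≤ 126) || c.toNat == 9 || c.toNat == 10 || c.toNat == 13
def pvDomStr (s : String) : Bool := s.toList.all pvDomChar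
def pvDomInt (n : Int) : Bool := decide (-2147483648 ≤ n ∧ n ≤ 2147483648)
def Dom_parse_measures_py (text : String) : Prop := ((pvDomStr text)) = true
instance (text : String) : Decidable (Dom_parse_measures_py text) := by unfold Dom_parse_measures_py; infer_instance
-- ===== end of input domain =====

-- B replaces A's single accumulating scan by a truncate-at-'||' / split-on-'|' / map-and-filter
-- pipeline (objective: idiomatic); where the first '||' directly follows a note/rest token,
-- A returns the last measure twice (append-before-break plus post-loop append) and B once (D_ below).

-- ===== PORT A =====
-- A's for-loop over the tokens: state (measures, current_measure); the '||' branch returns (break);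
-- the caller then performs the post-loop "if current_measure: measures.append(current_measure)".
def pvALoop : List String → List (List String) → List String → List (List String) × List String
  | [], ms, cur => (ms, cur)
  | t :: ts, ms, cur =>
    if t = "|" then
      if cur ≠ [] then pvALoop ts (ms ++ [cur]) [] else pvALoop ts ms cur
    else if t = "||" then
      if cur ≠ [] then (ms ++ [cur], cur) else (ms, cur)
    else if t = "-" ∨ t = "0" then pvALoop ts ms (cur ++ ["REST"])
    else pvALoop ts ms (cur ++ [t])

def parse_measures_py (text : String) : List (List String) :=
  let r := pvALoop (PySem.Str.split₀ text) [] []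
  if r.2 ≠ [] then r.1 ++ [r.2] else r.1

-- ===== PORT B =====
def pvMapTok (t : String) : String := if t = "-" ∨ t = "0" then "REST" else t

-- Source B's while-'|'-in-tokens loop: peel tokens[:i] off and continue on tokens[i+1:]
def pvSplitBars (ts : List String) : List (List String) :=
  match h : PySem.List.index? ts "|" with
  | some i => ts.take i :: pvSplitBars (ts.drop (i + 1))
  | none => [ts]
termination_by ts.length
decreasing_by
  obtain ⟨hk, -, -⟩ := PySem.List.getElem_of_index?_eq_some h
  simp only [List.length_drop]; omega

def parse_measures_py_alt (text : String) : List (List String) :=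
  let tokens0 := PySem.Str.split₀ text
  let tokens := match PySem.List.index? tokens0 "||" with
    | some i => tokens0.take i
    | none => tokens0
  ((pvSplitBars tokens).filter (fun g => g ≠ [])).map (fun g => g.map pvMapTok)

-- ===== PRECONDITION & SPEC =====
-- When the first '||' token is directly preceded by a note/rest token (current measure nonempty at
-- the terminator), A appends that last measure twice (before break and again after the loop) while
-- B returns it once, which is the intended 'save the current measure and stop' behaviour.
def D_parse_measures_py (text : String) : Prop :=
  let ts := PySem.Str.split₀ text
  let pre := ts.take ((PySem.List.index? ts "||").getD ts.length)
  "||" ∈ ts ∧ pre.getLast? ≠ none ∧ pre.getLast? ≠ some "|"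
instance (text : String) : Decidable (D_parse_measures_py text) := by unfold D_parse_measures_py; infer_instance

def Spec_parse_measures_py (text : String) (out : List (List String)) : Prop := ¬ D_parse_measures_py text → out = parse_measures_py_alt text
instance (text : String) (out : List (List String)) : Decidable (Spec_parse_measures_py text out) := by unfold Spec_parse_measures_py; infer_instance

def pvDiffWitness_parse_measures_py : String := "1 ||"
def pvDiffWitnessOut_parse_measures_py : (List (List String)) × (List (List String)) := ([["1"], ["1"]], [["1"]])

-- ===== CLAIM (what is proved, stated in full; the proofs are below) =====
def Claim_unchanged_parse_measures_py : Prop := ∀ (text : String), Dom_parse_measures_py text → Spec_parse_measures_py text (parse_measures_py text)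
def Claim_changed_parse_measures_py : Prop := Dom_parse_measures_py (pvDiffWitness_parse_measures_py) ∧ D_parse_measures_py (pvDiffWitness_parse_measures_py) ∧ parse_measures_py (pvDiffWitness_parse_measures_py) = pvDiffWitnessOut_parse_measures_py.1 ∧ parse_measures_py_alt (pvDiffWitness_parse_measures_py) = pvDiffWitnessOut_parse_measures_py.2 ∧ pvDiffWitnessOut_parse_measures_py.1 ≠ pvDiffWitnessOut_parse_measures_py.2
def Claim_exact_parse_measures_py : Prop := ∀ (text : String), Dom_parse_measures_py text → D_parse_measures_py text → parse_measures_py text ≠ parse_measures_py_alt text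

-- ===== LEMMAS AND PROOFS =====

-- cons-structured version of pvSplitBars, convenient for induction
def pvSB : List String → List (List String)
  | [] => [[]]
  | t :: ts =>
    if t = "|" then [] :: pvSB ts
    else
      match pvSB ts with
      | g :: gs => (t :: g) :: gs
      | [] => [[t]]

lemma pvSB_ne_nil (ts : List String) : pvSB ts ≠ [] := by
  cases ts with
  | nil => simp [pvSB]
  | cons t ts =>
    simp only [pvSB]
    split_ifs
    · simp
    · cases h : pvSB ts <;> simp

lemma pvSB_no_bar (ts : List String) (h : "|" ∉ ts) : pvSB ts = [ts] := by
  induction ts with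
  | nil => rfl
  | cons t ts ih =>
    simp only [List.mem_cons, not_or] at h
    simp [pvSB, Ne.symm h.1, ih h.2]

lemma pvSB_bar (pre suf : List String) (h : "|" ∉ pre) :
    pvSB (pre ++ "|" :: suf) = pre :: pvSB suf := by
  induction pre with
  | nil => simp [pvSB]
  | cons p ps ih =>
    simp only [List.mem_cons, not_or] at h
    simp [pvSB, Ne.symm h.1, ih h.2]

lemma pvSB_eq (ts : List String) : pvSplitBars ts = pvSB ts := by
  induction ts using pvSplitBars.induct with
  | case1 ts i h ih =>
    obtain ⟨pre, suf, hts, hlen, hmem⟩ := (PySem.List.index?_eq_some_iff ts "|" i).mp h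
    rw [pvSplitBars]
    split
    next i' h' =>
      rw [h] at h'
      obtain rfl := Option.some.inj h'
      subst hts
      rw [pvSB_bar pre suf hmem, ih]
      subst hlen
      congr 1
      · exact List.take_left
      · congr 1
        have : pre.length + 1 = (pre ++ ["|"]).length := by simp
        rw [this, show pre ++ "|" :: suf = (pre ++ ["|"]) ++ suf by simp]
        exact List.drop_left
    next h' =>
      rw [h] at h'
      exact absurd h' (by simp)
  | case2 ts h =>
    rw [PySem.List.index?_eq_none_iff] at h
    rw [pvSplitBars]
    split
    next i' h' =>
      exact absurd (((PySem.List.index?_isSome_iff ts "|").mp (by rw [h']; rfl))) h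
    next _ =>
      rw [pvSB_no_bar ts h]

def pvFinish (r : List (List String) × List String) : List (List String) :=
  if r.2 ≠ [] then r.1 ++ [r.2] else r.1

def pvGlue (cur : List String) : List (List String) → List (List String)
  | [] => []
  | g :: gs => ((cur ++ g.map pvMapTok) :: gs.map (fun g => g.map pvMapTok)).filter (fun g => g ≠ [])

lemma pvGlue_nil_eq (l : List (List String)) :
    pvGlue [] l = (l.map (fun g => g.map pvMapTok)).filter (fun g => g ≠ []) := by
  cases l <;> simp [pvGlue]

-- core invariant of A's loop on a token list free of '||'
lemma pvALoop_inv (ts : List String) (ms : List (List String)) (cur : List String)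
    (h : "||" ∉ ts) : pvFinish (pvALoop ts ms cur) = ms ++ pvGlue cur (pvSB ts) := by
  induction ts generalizing ms cur with
  | nil =>
    by_cases hc : cur = [] <;> simp [pvALoop, pvFinish, pvSB, pvGlue, hc]
  | cons t ts ih =>
    simp only [List.mem_cons, not_or] at h
    obtain ⟨ht2, hts⟩ := h
    by_cases ht : t = "|"
    · subst ht
      obtain ⟨g, gs, hg⟩ : ∃ g gs, pvSB ts = g :: gs := by
        cases hsb : pvSB ts with
        | nil => exact absurd hsb (pvSB_ne_nil ts)
        | cons g gs => exact ⟨g, gs, rfl⟩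
      have hstep : pvALoop ("|" :: ts) ms cur = pvALoop ts (if cur ≠ [] then ms ++ [cur] else ms) [] := by
        by_cases hc : cur = [] <;> simp [pvALoop, hc]
      rw [hstep, ih _ _ hts]
      rw [show pvSB ("|" :: ts) = [] :: pvSB ts from by simp [pvSB]]
      by_cases hc : cur = [] <;>
        simp [pvGlue, hg, hc, List.filter_cons, List.append_assoc]
    · obtain ⟨g, gs, hg⟩ : ∃ g gs, pvSB ts = g :: gs := by
        cases hsb : pvSB ts with
        | nil => exact absurd hsb (pvSB_ne_nil ts)
        | cons g gs => exact ⟨g, gs, rfl⟩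
      have hsb : pvSB (t :: ts) = (t :: g) :: gs := by
        simp [pvSB, ht, hg]
      by_cases hr : t = "-" ∨ t = "0"
      · have : pvALoop (t :: ts) ms cur = pvALoop ts ms (cur ++ ["REST"]) := by
          simp [pvALoop, ht, hr, show t ≠ "||" from Ne.symm ht2]
        rw [this, ih _ _ hts, hsb, hg]
        simp [pvGlue, pvMapTok, hr, List.append_assoc]
      · have : pvALoop (t :: ts) ms cur = pvALoop ts ms (cur ++ [t]) := by
          simp only [pvALoop, if_neg ht, if_neg (Ne.symm ht2), if_neg hr]
        rw [this, ih _ _ hts, hsb, hg]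
        simp [pvGlue, pvMapTok, hr, List.append_assoc]

-- A's loop splits at the first '||'
lemma pvALoop_split (pre suf : List String) (ms : List (List String)) (cur : List String)
    (h : "||" ∉ pre) :
    pvALoop (pre ++ "||" :: suf) ms cur =
      (let r := pvALoop pre ms cur; if r.2 ≠ [] then (r.1 ++ [r.2], r.2) else r) := by
  induction pre generalizing ms cur with
  | nil =>
    by_cases hc : cur = [] <;> simp [pvALoop, hc]
  | cons t ts ih =>
    simp only [List.mem_cons, not_or] at h
    obtain ⟨ht2, hts⟩ := h
    by_cases ht : t = "|"
    · subst ht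
      by_cases hc : cur = [] <;>
        simp [pvALoop, hc, ih _ _ hts]
    · by_cases hr : t = "-" ∨ t = "0" <;>
        simp [pvALoop, ht, Ne.symm ht2, hr, ih _ _ hts]

-- the carried measure after a '||'-free run is empty iff the run ends with '|' (or never started)
lemma pvALoop_snd (ts : List String) (ms : List (List String)) (cur : List String)
    (h : "||" ∉ ts) :
    ((pvALoop ts ms cur).2 = [] ↔ ((ts = [] ∧ cur = []) ∨ ts.getLast? = some "|")) := by
  induction ts generalizing ms cur with
  | nil => simp [pvALoop]
  | cons t ts ih =>
    simp only [List.mem_cons, not_or] at h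
    obtain ⟨ht2, hts⟩ := h
    by_cases ht : t = "|"
    · subst ht
      have hstep : (pvALoop ("|" :: ts) ms cur).2 = (pvALoop ts (if cur ≠ [] then ms ++ [cur] else ms) []).2 := by
        by_cases hc : cur = [] <;> simp [pvALoop, hc]
      rw [hstep, ih _ _ hts]
      cases ts with
      | nil => simp
      | cons u us => simp [List.getLast?_cons_cons]
    · have hstep : ∃ x, (pvALoop (t :: ts) ms cur).2 = (pvALoop ts ms (cur ++ [x])).2 := by
        by_cases hr : t = "-" ∨ t = "0"
        · exact ⟨"REST", by simp [pvALoop, ht, Ne.symm ht2, hr]⟩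
        · exact ⟨t, by simp only [pvALoop, if_neg ht, if_neg (Ne.symm ht2), if_neg hr]⟩
      obtain ⟨x, hstep⟩ := hstep
      rw [hstep, ih _ _ hts]
      cases ts with
      | nil => simp [ht]
      | cons u us => simp [List.getLast?_cons_cons]

-- filter-then-map (Source B's comprehension) commutes to map-then-filter
lemma pvMfComm (l : List (List String)) :
    (l.filter (fun g => g ≠ [])).map (fun g => g.map pvMapTok) =
      (l.map (fun g => g.map pvMapTok)).filter (fun g => g ≠ []) := by
  induction l with
  | nil => rfl
  | cons g gs ih =>
    simp only [ne_eq, decide_not] at ih ⊢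
    by_cases hg : g = [] <;> simp [List.filter_cons, hg, ih]

lemma pvAlt_eq_glue (tk : List String) :
    ((pvSplitBars tk).filter (fun g => g ≠ [])).map (fun g => g.map pvMapTok) =
      pvGlue [] (pvSB tk) := by
  rw [pvSB_eq, pvGlue_nil_eq, pvMfComm]

lemma main_unchanged : ∀ (text : String), ¬ D_parse_measures_py text →
    parse_measures_py text = parse_measures_py_alt text := by
  intro text hnD
  unfold parse_measures_py parse_measures_py_alt D_parse_measures_py at *
  simp only at *
  cases h : PySem.List.index? (PySem.Str.split₀ text) "||" with
  | none =>
    simp only [h]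
    have hmem := (PySem.List.index?_eq_none_iff (PySem.Str.split₀ text) "||").mp h
    rw [pvAlt_eq_glue]
    exact pvALoop_inv _ [] [] hmem
  | some i =>
    obtain ⟨pre, suf, hts, hlen, hmem⟩ :=
      (PySem.List.index?_eq_some_iff (PySem.Str.split₀ text) "||" i).mp h
    simp only [h, Option.getD_some] at hnD ⊢
    have htake : (PySem.Str.split₀ text).take i = pre := by
      rw [hts, ← hlen]; exact List.take_left
    rw [htake] at hnD ⊢
    have hin : "||" ∈ PySem.Str.split₀ text := by rw [hts]; simp
    have hlast : pre.getLast? = none ∨ pre.getLast? = some "|" := by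
      by_contra hc
      push_neg at hc
      exact hnD ⟨hin, hc.1, hc.2⟩
    have hsnd : (pvALoop pre [] []).2 = [] := by
      rw [pvALoop_snd pre [] [] hmem]
      rcases hlast with hl | hl
      · left; exact ⟨List.getLast?_eq_none_iff.mp hl, rfl⟩
      · right; exact hl
    rw [hts, pvALoop_split pre suf [] [] hmem]
    simp only [hsnd, ne_eq, not_true_eq_false, ite_false, if_neg]
    rw [pvAlt_eq_glue]
    have := pvALoop_inv pre [] [] hmem
    unfold pvFinish at this
    simpa [hsnd] using this

lemma main_tight : ∀ (text : String), D_parse_measures_py text →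
    parse_measures_py text ≠ parse_measures_py_alt text := by
  intro text hD
  unfold parse_measures_py parse_measures_py_alt D_parse_measures_py at *
  simp only at *
  obtain ⟨hin, hl1, hl2⟩ := hD
  obtain ⟨i, h⟩ := Option.isSome_iff_exists.mp ((PySem.List.index?_isSome_iff _ "||").mpr hin)
  obtain ⟨pre, suf, hts, hlen, hmem⟩ :=
    (PySem.List.index?_eq_some_iff (PySem.Str.split₀ text) "||" i).mp h
  simp only [h, Option.getD_some] at hl1 hl2 ⊢
  have htake : (PySem.Str.split₀ text).take i = pre := by
    rw [hts, ← hlen]; exact List.take_left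
  rw [htake] at hl1 hl2 ⊢
  have hsnd : (pvALoop pre [] []).2 ≠ [] := by
    rw [ne_eq, pvALoop_snd pre [] [] hmem]
    push_neg
    refine ⟨fun hpre _ => hl1 (by simp [hpre]), hl2⟩
  rw [hts, pvALoop_split pre suf [] [] hmem]
  simp only [hsnd, ne_eq, not_false_eq_true, ite_true, if_pos]
  rw [pvAlt_eq_glue]
  have hB := pvALoop_inv pre [] [] hmem
  unfold pvFinish at hB
  rw [if_pos hsnd] at hB
  simp only [List.nil_append] at hB
  rw [← hB]
  intro hcontra
  have := congrArg List.length hcontra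
  simp at this

-- ===== VERDICT (by name: the statement is the Claim_ definition above) =====
theorem parse_measures_py_spec : Claim_unchanged_parse_measures_py := by
  intro text _ hnD
  exact main_unchanged text hnD

theorem parse_measures_py_changed : Claim_changed_parse_measures_py := by
  unfold Claim_changed_parse_measures_py
  refine ⟨by decide, by decide, by decide, ?_, by decide⟩
  show parse_measures_py_alt pvDiffWitness_parse_measures_py = pvDiffWitnessOut_parse_measures_py.2
  simp only [pvDiffWitness_parse_measures_py, pvDiffWitnessOut_parse_measures_py,
    parse_measures_py_alt, pvSB_eq]
  decide

theorem parse_measures_py_tight : Claim_exact_parse_measures_py := by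
  intro text _ hD
  exact main_tight text hD
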